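-- pv_equiv track=rewrite | github.com/AshwinVishwanath/C.A.S.P.E.R.-2 | tools/casper_decode.py | _data_bit_to_pos
-- ===== SOURCE A (Python) =====
-- def _is_power_of_2(n):
--     return n > 0 and (n & (n - 1)) == 0
--
-- def _data_bit_to_pos(data_idx):
--     """Map 0-based data bit index to 1-based Hamming position."""
--     pos = 1
--     count = 0
--     while True:
--         if not _is_power_of_2(pos):
--             if count == data_idx:
--                 return pos
--             count += 1
--         pos += 1
-- ===== SOURCE B (Python) =====
-- def _data_bit_to_pos(data_idx):
--     """Closed form: the answer is (data_idx+1)+r where r is the number of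
--     powers of two not exceeding the answer; find r by doubling (O(log n))."""
--     n = data_idx + 1
--     r, p = 1, 2
--     while p <= n + r:
--         p *= 2
--         r += 1
--     return n + r
-- ===== Notes on version B (the rewrite author's own statement) =====
-- stated objective: faster
-- what changed: A scans every Hamming position in order, counting non-powers of two until the count reaches data_idx; B computes the answer directly as data_idx plus one plus r, finding r (the number of powers of two at or below the answer) by a doubling loop of logarithmically many steps; Pre_ excludes negative data_idx, where A's while-True loop never returns (infinite loop).
import Mathlib
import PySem

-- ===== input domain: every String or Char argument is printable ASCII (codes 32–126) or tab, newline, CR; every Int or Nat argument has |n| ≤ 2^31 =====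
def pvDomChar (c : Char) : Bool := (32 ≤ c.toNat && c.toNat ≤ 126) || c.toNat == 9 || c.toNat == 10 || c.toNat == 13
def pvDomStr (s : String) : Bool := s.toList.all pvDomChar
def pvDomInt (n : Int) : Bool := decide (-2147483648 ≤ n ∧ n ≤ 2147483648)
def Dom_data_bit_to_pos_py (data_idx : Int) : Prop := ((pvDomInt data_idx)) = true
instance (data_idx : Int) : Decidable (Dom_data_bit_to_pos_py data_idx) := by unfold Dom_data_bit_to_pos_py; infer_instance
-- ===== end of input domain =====

-- B replaces A's linear scan over all Hamming positions by an O(log n) doubling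
-- search for the number of powers of two the layout skips (objective: faster).

-- ===== PORT A =====
def pyIsPow2 (n : Int) : Bool := decide (0 < n) && (Int.land n (n - 1) == 0)

-- fuel only totalises the `while True` loop; it is proved sufficient on Pre_
-- (the loop visits exactly `answer ≤ 2*data_idx+4` positions); for negative data_idx
-- (outside Pre_) the Python loop never returns.
def loopA (data_idx : Int) (pos count : Int) : Nat → Int
  | 0 => 0
  | fuel+1 =>
    if pyIsPow2 pos = false then
      if count = data_idx then pos
      else loopA data_idx (pos + 1) (count + 1) fuel
    else loopA data_idx (pos + 1) count fuel

def data_bit_to_pos_py (data_idx : Int) : Int :=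
  loopA data_idx 1 0 (2 * data_idx.toNat + 4)

-- ===== PORT B =====
-- fuel 64 only totalises the doubling loop: p reaches 2^65 > n + r for every n in Dom.
def loopB (n : Int) (r p : Int) : Nat → Int
  | 0 => n + r
  | fuel+1 => if p ≤ n + r then loopB n (r + 1) (p * 2) fuel else n + r

def data_bit_to_pos_py_alt (data_idx : Int) : Int :=
  loopB (data_idx + 1) 1 2 64

-- ===== PRECONDITION & SPEC =====
-- Pre_ excludes negative data_idx, where Python A never returns (infinite loop).
def Pre_data_bit_to_pos_py (data_idx : Int) : Prop := 0 ≤ data_idx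
instance (data_idx : Int) : Decidable (Pre_data_bit_to_pos_py data_idx) := by
  unfold Pre_data_bit_to_pos_py; infer_instance
def pvWitness_data_bit_to_pos_py : Int := 3

def Spec_data_bit_to_pos_py (data_idx : Int) (out : Int) : Prop := out = data_bit_to_pos_py_alt data_idx
instance (data_idx : Int) (out : Int) : Decidable (Spec_data_bit_to_pos_py data_idx out) := by unfold Spec_data_bit_to_pos_py; infer_instance

-- ===== CLAIM (what is proved, stated in full; the proofs are below) =====
def Claim_equal_data_bit_to_pos_py : Prop := ∀ (data_idx : Int), Dom_data_bit_to_pos_py data_idx → Pre_data_bit_to_pos_py data_idx → Spec_data_bit_to_pos_py data_idx (data_bit_to_pos_py data_idx)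

-- ===== LEMMAS AND PROOFS =====

-- n & (n-1) = 0 characterises the powers of two among the positive naturals.
lemma land_pred (m : Nat) (hm : 0 < m) : (m &&& (m - 1) = 0) ↔ ∃ j, m = 2 ^ j := by
  induction m using Nat.strong_induction_on with
  | _ m ih =>
  rcases Nat.even_or_odd m with he | ho
  · obtain ⟨k, hk⟩ := he
    have hk' : m = 2 * k := by omega
    have hk1 : 1 ≤ k := by omega
    have hbit : (2 * k) &&& (2 * (k - 1) + 1) = 2 * (k &&& (k - 1)) := by
      have h := Nat.land_bit false k true (k - 1)
      simpa [Nat.bit] using h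
    rw [hk', show 2 * k - 1 = 2 * (k - 1) + 1 by omega, hbit]
    have ihk := ih k (by omega) (by omega)
    constructor
    · intro h
      obtain ⟨j, hj⟩ := ihk.1 (by omega)
      exact ⟨j + 1, by rw [pow_succ]; omega⟩
    · rintro ⟨j, hj⟩
      rcases j with _ | j'
      · omega
      · have : k = 2 ^ j' := by rw [pow_succ] at hj; omega
        have := ihk.2 ⟨j', this⟩
        omega
  · obtain ⟨k, hk⟩ := ho
    have hbit : (2 * k + 1) &&& (2 * k) = 2 * (k &&& k) := by
      have h := Nat.land_bit true k false k
      simpa [Nat.bit] using h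
    rw [hk, show 2 * k + 1 - 1 = 2 * k by omega, hbit]
    rw [show k &&& k = k by simp]
    constructor
    · intro h
      exact ⟨0, by omega⟩
    · rintro ⟨j, hj⟩
      rcases j with _ | j'
      · omega
      · rw [pow_succ] at hj
        have : 1 ≤ 2 ^ j' := Nat.one_le_two_pow
        omega

lemma pyIsPow2_cast (m : Nat) (hm : 1 ≤ m) :
    pyIsPow2 (↑m) = true ↔ ∃ j, m = 2 ^ j := by
  have h1 : ((m : Int) - 1) = ((m - 1 : Nat) : Int) := by omega
  have h2 : (Int.land ↑m ↑(m - 1)) = ((m &&& (m - 1) : Nat) : Int) := rfl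
  simp only [pyIsPow2, h1, h2, Bool.and_eq_true, beq_iff_eq, decide_eq_true_eq]
  rw [← land_pred m (by omega)]
  constructor
  · rintro ⟨-, h⟩; exact_mod_cast h
  · intro h; exact ⟨by exact_mod_cast Nat.lt_of_lt_of_le Nat.zero_lt_one hm, by exact_mod_cast h⟩

-- number of powers of two in [1, M]
def cntP : Nat → Nat
  | 0 => 0
  | M + 1 => cntP M + (if M + 1 = 2 ^ Nat.log 2 (M + 1) then 1 else 0)

-- number of non-powers of two in [1, M]
def nnp (M : Nat) : Nat := M - cntP M

lemma cntP_le (M : Nat) : cntP M ≤ M := by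
  induction M with
  | zero => simp [cntP]
  | succ M ih => simp only [cntP]; split <;> omega

lemma nnp_succ (M : Nat) :
    nnp (M + 1) = nnp M + (if M + 1 = 2 ^ Nat.log 2 (M + 1) then 0 else 1) := by
  have h := cntP_le M
  simp only [nnp, cntP]; split_ifs <;> omega

lemma nnp_mono {a b : Nat} (h : a ≤ b) : nnp a ≤ nnp b := by
  induction b with
  | zero => have : a = 0 := by omega
            subst this; exact le_refl _
  | succ b ih =>
    rcases Nat.eq_or_lt_of_le h with rfl | h'
    · exact le_refl _
    · have := ih (by omega); rw [nnp_succ]; split_ifs <;> omega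

lemma pp_iff_pow (m : Nat) : m = 2 ^ Nat.log 2 m ↔ ∃ j, m = 2 ^ j := by
  constructor
  · intro h; exact ⟨Nat.log 2 m, h⟩
  · rintro ⟨j, rfl⟩; rw [Nat.log_pow (by norm_num)]

lemma cntP_eq_log' (M : Nat) (hM : 1 ≤ M)
    (f : Nat → Nat)
    (h0 : f 0 = 0)
    (hs : ∀ N, f (N+1) = f N + (if N + 1 = 2 ^ Nat.log 2 (N+1) then 1 else 0)) :
    f M = Nat.log 2 M + 1 := by
  induction M with
  | zero => omega
  | succ M ihM =>
    rcases Nat.eq_or_lt_of_le hM with h1 | h1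
    · simp [hs, h0, ← h1]
    · have hM1 : 1 ≤ M := by omega
      have ih := ihM hM1
      rw [hs]
      split_ifs with hp
      · set j := Nat.log 2 (M+1) with hj
        have hj1 : 1 ≤ j := by
          by_contra h
          have : j = 0 := by omega
          rw [this] at hp; simp at hp; omega
        have h2 : 1 ≤ 2 ^ (j-1) := Nat.one_le_two_pow
        have h3 : 2 ^ j = 2 * 2 ^ (j - 1) := by
          conv_lhs => rw [show j = (j-1)+1 by omega, pow_succ]
          ring
        have hlogM : Nat.log 2 M = j - 1 := by
          apply Nat.log_eq_of_pow_le_of_lt_pow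
          · omega
          · rw [show j - 1 + 1 = j by omega]; omega
        rw [ih, hlogM]; omega
      · have hle : 2 ^ Nat.log 2 M ≤ M := Nat.pow_log_le_self 2 (by omega)
        have hlt : M < 2 ^ (Nat.log 2 M + 1) := Nat.lt_pow_succ_log_self (by norm_num) M
        have hne : M + 1 ≠ 2 ^ (Nat.log 2 M + 1) := by
          intro h
          apply hp
          rw [h, Nat.log_pow (by norm_num)]
        have : Nat.log 2 (M+1) = Nat.log 2 M := by
          apply Nat.log_eq_of_pow_le_of_lt_pow <;> omega
        rw [ih, this]

lemma cntP_eq_log (M : Nat) (hM : 1 ≤ M) : cntP M = Nat.log 2 M + 1 :=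
  cntP_eq_log' M hM cntP rfl (fun _ => rfl)

lemma two_mul_le_pow (R : Nat) : 2 * R ≤ 2 ^ R + 1 := by
  induction R with
  | zero => norm_num
  | succ R ih =>
    rw [pow_succ]
    have h1 : R < 2 ^ R := Nat.lt_two_pow_self
    omega

-- B's loop, started with p = 2^r, exits at the first R with n + R < 2^R.
lemma loopB_spec (fuel : Nat) : ∀ (r nn : Nat), 1 ≤ nn → 1 ≤ r →
    2 ^ (r - 1) ≤ nn + r - 1 → nn + (r + fuel) < 2 ^ (r + fuel) →
    ∃ R : Nat, loopB ↑nn ↑r ↑(2 ^ r : Nat) fuel = ↑(nn + R) ∧ r ≤ R ∧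
      2 ^ (R - 1) ≤ nn + R - 1 ∧ nn + R < 2 ^ R := by
  induction fuel with
  | zero =>
    intro r nn h1 h2 h3 h4
    exact ⟨r, by simp only [loopB]; push_cast; ring, le_refl r, h3, by simpa using h4⟩
  | succ fuel ih =>
    intro r nn h1 h2 h3 h4
    simp only [loopB]
    split_ifs with h
    · have hc : 2 ^ r ≤ nn + r := by exact_mod_cast h
      have e1 : (↑r : Int) + 1 = ↑(r + 1) := by push_cast; ring
      have e2 : (↑(2 ^ r : Nat) : Int) * 2 = ↑(2 ^ (r + 1) : Nat) := by
        push_cast [pow_succ]; ring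
      rw [e1, e2]
      obtain ⟨R, hR, hle, hi, hlt⟩ := ih (r + 1) nn h1 (by omega)
        (by simpa using hc)
        (by rw [show r + 1 + fuel = r + (fuel + 1) by omega]; exact h4)
      exact ⟨R, hR, by omega, hi, hlt⟩
    · have hc : ¬ (2 ^ r ≤ nn + r) := by
        intro hx; exact h (by exact_mod_cast hx)
      exact ⟨r, by push_cast; ring, le_refl r, h3, by omega⟩

-- A's loop invariant: at position pos the counter holds the number of
-- non-powers of two below pos; the loop stops at the non-power P with
-- nnp (P-1) = data_idx.
lemma loopA_spec (P : Nat) (d : Int) (hPnp : ¬ ∃ j, P = 2 ^ j)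
    (hd : (↑(nnp (P - 1)) : Int) = d) :
    ∀ (fuel pos : Nat), 1 ≤ pos → pos ≤ P → P - pos + 1 ≤ fuel →
      loopA d ↑pos ↑(nnp (pos - 1)) fuel = ↑P := by
  intro fuel
  induction fuel with
  | zero => intro pos h1 h2 h3; omega
  | succ fuel ih =>
    intro pos h1 h2 hf
    simp only [loopA]
    rcases Nat.eq_or_lt_of_le h2 with rfl | hlt
    · have hnp : pyIsPow2 ↑pos = false := by
        rw [Bool.eq_false_iff]
        intro h; exact hPnp ((pyIsPow2_cast pos h1).1 h)
      rw [if_pos hnp, if_pos hd]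
    · have hpos1 : pos + 1 - 1 = pos := by omega
      by_cases hpp : ∃ j, pos = 2 ^ j
      · have ht : ¬ (pyIsPow2 ↑pos = false) := by
          simp [(pyIsPow2_cast pos h1).2 hpp]
        rw [if_neg ht]
        have hstep : nnp pos = nnp (pos - 1) := by
          have := nnp_succ (pos - 1)
          rw [show pos - 1 + 1 = pos by omega] at this
          rw [this, if_pos ((pp_iff_pow pos).2 hpp)]
          omega
        have := ih (pos + 1) (by omega) (by omega) (by omega)
        rw [hpos1, hstep] at this
        rw [show (↑pos : Int) + 1 = ↑(pos + 1) by push_cast; ring]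
        exact this
      · have hnp : pyIsPow2 ↑pos = false := by
          rw [Bool.eq_false_iff]
          intro h; exact hpp ((pyIsPow2_cast pos h1).1 h)
        rw [if_pos hnp]
        have hstep : nnp pos = nnp (pos - 1) + 1 := by
          have := nnp_succ (pos - 1)
          rw [show pos - 1 + 1 = pos by omega] at this
          rw [this, if_neg (fun hx => hpp ((pp_iff_pow pos).1 hx))]
        have hne : (↑(nnp (pos - 1)) : Int) ≠ d := by
          rw [← hd]
          have hmono : nnp pos ≤ nnp (P - 1) := nnp_mono (by omega)
          intro hx
          have : nnp (pos - 1) = nnp (P - 1) := by exact_mod_cast hx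
          omega
        rw [if_neg hne]
        have := ih (pos + 1) (by omega) (by omega) (by omega)
        rw [hpos1, hstep] at this
        rw [show (↑pos : Int) + 1 = ↑(pos + 1) by push_cast; ring,
            show (↑(nnp (pos - 1)) : Int) + 1 = ↑(nnp (pos - 1) + 1) by push_cast; ring]
        exact this

lemma ports_agree (d : Int) (h0 : 0 ≤ d) (hhi : d ≤ 2147483648) :
    loopA d 1 0 (2 * d.toNat + 4) = loopB (d + 1) 1 2 64 := by
  set nn := d.toNat + 1 with hnn
  have hd1 : (d : Int) + 1 = ↑nn := by omega
  have hnn1 : 1 ≤ nn := by omega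
  have hnnhi : nn ≤ 2147483649 := by omega
  have hbig : nn + (1 + 64) < 2 ^ (1 + 64) := by
    have h : (2:Nat) ^ (1 + 64) = 36893488147419103232 := by norm_num
    omega
  obtain ⟨R, hB, hR1, hR2, hR3⟩ := loopB_spec 64 1 nn hnn1 (le_refl 1)
    (by simpa using hnn1) hbig
  rw [show ((1:Nat):Int) = 1 by norm_num, show ((2^1:Nat):Int) = 2 by norm_num] at hB
  have hRb : 2 * (R - 1) ≤ 2 ^ (R - 1) + 1 := two_mul_le_pow (R - 1)
  have hRle : R ≤ nn + 2 := by
    have h5 : 2 * (R - 1) ≤ nn + R := le_trans hRb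
      (le_trans (Nat.add_le_add_right hR2 1) (by omega))
    omega
  have hP2 : 2 ≤ nn + R := by omega
  have hPnp : ¬ ∃ j, nn + R = 2 ^ j := by
    rintro ⟨j, hj⟩
    have h4 : (2:Nat) ^ (R - 1) < 2 ^ j := by omega
    have hj2 : R - 1 < j := (Nat.pow_lt_pow_iff_right (by norm_num)).1 h4
    have h5 : (2:Nat) ^ R ≤ 2 ^ j := Nat.pow_le_pow_right (by norm_num) (by omega)
    omega
  have hlog : Nat.log 2 (nn + R - 1) = R - 1 := by
    apply Nat.log_eq_of_pow_le_of_lt_pow hR2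
    rw [show R - 1 + 1 = R by omega]
    omega
  have hcnt : cntP (nn + R - 1) = R := by
    rw [cntP_eq_log _ (by omega), hlog]; omega
  have hnnp : nnp (nn + R - 1) = nn - 1 := by
    have h := cntP_le (nn + R - 1)
    simp only [nnp, hcnt]; omega
  have hA := loopA_spec (nn + R) d hPnp
    (by rw [hnnp]; omega)
    (2 * d.toNat + 4) 1 (le_refl 1) (by omega) (by omega)
  rw [show ((1:Nat):Int) = 1 by norm_num, show (1:Nat) - 1 = 0 by rfl,
      show nnp 0 = 0 by rfl, show ((0:Nat):Int) = 0 by norm_num] at hA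
  rw [hd1, hB, hA]

-- ===== VERDICT (by name: the statement is the Claim_ definition above) =====
theorem data_bit_to_pos_py_spec : Claim_equal_data_bit_to_pos_py := by
  intro d hdom hpre
  unfold Spec_data_bit_to_pos_py data_bit_to_pos_py data_bit_to_pos_py_alt
  have hhi : d ≤ 2147483648 := by
    unfold Dom_data_bit_to_pos_py pvDomInt at hdom
    simp only [decide_eq_true_eq] at hdom
    exact hdom.2
  exact ports_agree d hpre hhi
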